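-- pv_equiv track=rewrite | github.com/cgroza06/Calcul-Numeric | tema_6/prob_1.py | calcul_delta_y
-- ===== SOURCE A (Python) =====
-- def calcul_delta_y(y):
--     n = len(y)
--     table = [y]
--     for j in range(1, n):
--         next_row = []
--         for i in range(n - j):
--             next_row.append(table[j - 1][i + 1] - table[j - 1][i])
--         table.append(next_row)
--         y[j]=next_row[0]
--     return y
-- ===== SOURCE B (Python) =====
-- def calcul_delta_y(y):
--     # In-place single-array update: after pass j, y[j] holds the j-th forward
--     # difference Delta^j y[0]; no 2-D table is built.
--     n = len(y)
--     for j in range(1, n):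
--         for i in reversed(range(j, n)):
--             y[i] = y[i] - y[i - 1]
--     return y
-- ===== Notes on version B (the rewrite author's own statement) =====
-- stated objective: faster
-- what changed: Replaces the growing 2-D list-of-rows difference table (with y[j] patched from each new row's head) by a single in-place backward sweep over y itself, so no auxiliary row lists are ever allocated or appended to.
import Mathlib
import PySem

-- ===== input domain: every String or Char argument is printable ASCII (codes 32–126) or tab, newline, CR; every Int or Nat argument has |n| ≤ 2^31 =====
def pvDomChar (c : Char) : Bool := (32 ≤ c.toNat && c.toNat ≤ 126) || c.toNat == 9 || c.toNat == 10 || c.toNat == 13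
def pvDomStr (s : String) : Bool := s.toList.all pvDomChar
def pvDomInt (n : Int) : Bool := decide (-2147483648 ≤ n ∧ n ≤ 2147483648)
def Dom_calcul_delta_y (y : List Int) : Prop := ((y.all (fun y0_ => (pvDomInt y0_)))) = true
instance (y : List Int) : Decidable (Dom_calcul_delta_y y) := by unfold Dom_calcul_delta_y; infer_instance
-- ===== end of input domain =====

-- B replaces A's growing 2-D difference table by an in-place backward sweep over y
-- (simpler: O(1) extra space, no auxiliary rows).  Both A and B mutate the argument
-- list in Python (to exactly the returned list); the equivalence proved here is about
-- the return value.

-- ===== PORT A =====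
-- A builds table = [y, row1, row2, …] where each row is the consecutive differences
-- of the previous one, and patches y[j] := next_row[0].  In Python table[0] aliases y;
-- the port mirrors the alias by rewriting table[0] after each write to y (that slot is
-- never read again, since table[j-1] is read before y[j] is written).
-- All indices are provably in range, so pyGetD's default is never used.
def calcul_delta_y (y : List Int) : List Int :=
  let n : Int := (y.length : Int)
  ((PySem.List.pyRange 1 n 1).foldl
    (fun (st : List (List Int) × List Int) (j : Int) =>
      let table := st.1
      let y := st.2
      let row := PySem.List.pyGetD table (j - 1) []        -- table[j-1]
      let next_row := (PySem.List.pyRange 0 (n - j) 1).foldl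
        (fun acc i => acc ++ [PySem.List.pyGetD row (i + 1) 0 - PySem.List.pyGetD row i 0]) []
      let table := table ++ [next_row]
      let y := y.set j.toNat (PySem.List.pyGetD next_row 0 0)   -- y[j] = next_row[0]
      let table := table.set 0 y                           -- table[0] is y (alias)
      (table, y))
    ([y], y)).2

-- ===== PORT B =====
-- In-place: for j in range(1, n): for i in reversed(range(j, n)): y[i] = y[i] - y[i-1].
-- All indices are provably in range (1 ≤ j ≤ i < n), so pyGetD's default is never used.
def calcul_delta_y_alt (y : List Int) : List Int :=
  let n : Int := (y.length : Int)
  (PySem.List.pyRange 1 n 1).foldl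
    (fun y j =>
      ((PySem.List.pyRange j n 1).reverse).foldl
        (fun y i =>
          y.set i.toNat (PySem.List.pyGetD y i 0 - PySem.List.pyGetD y (i - 1) 0))
        y)
    y

-- ===== PRECONDITION & SPEC =====
def Spec_calcul_delta_y (y : List Int) (out : List Int) : Prop := out = calcul_delta_y_alt y
instance (y : List Int) (out : List Int) : Decidable (Spec_calcul_delta_y y out) := by unfold Spec_calcul_delta_y; infer_instance

-- ===== CLAIM (what is proved, stated in full; the proofs are below) =====
def Claim_equal_calcul_delta_y : Prop := ∀ (y : List Int), Dom_calcul_delta_y y → Spec_calcul_delta_y y (calcul_delta_y y)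

-- ===== LEMMAS AND PROOFS =====

-- consecutive differences: (dstep r)[i] = r[i+1] - r[i]
def dstep (r : List Int) : List Int := List.zipWith (fun a b => a - b) r.tail r

-- head of the k-th iterated difference row
def hdI (y : List Int) (k : Nat) : Int := (dstep^[k] y).getD 0 0

-- the common value of both programs
def specList (y : List Int) : List Int := (List.range y.length).map (hdI y)

theorem len_dstep (r : List Int) : (dstep r).length = r.length - 1 := by
  simp [dstep]

theorem len_iter (y : List Int) (k : Nat) : (dstep^[k] y).length = y.length - k := by
  induction k with
  | zero => simp
  | succ k ih => rw [Function.iterate_succ_apply', len_dstep, ih]; omega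

theorem getElem_dstep (r : List Int) (i : Nat) (h : i < (dstep r).length) :
    (dstep r)[i] = r[i + 1]'(by have := len_dstep r; omega) - r[i]'(by have := len_dstep r; omega) := by
  simp only [dstep, List.getElem_zipWith, List.getElem_tail]

theorem getD_dstep (r : List Int) (i : Nat) (h : i + 1 < r.length) :
    (dstep r).getD i 0 = r.getD (i + 1) 0 - r.getD i 0 := by
  have hd : i < (dstep r).length := by rw [len_dstep]; omega
  rw [List.getD_eq_getElem _ _ hd, getElem_dstep,
    List.getD_eq_getElem _ _ h, List.getD_eq_getElem _ _ (by omega : i < r.length)]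

theorem map_diff_pyRange (r : List Int) :
    (PySem.List.pyRange 0 ((r.length : Int) - 1) 1).map
      (fun i => PySem.List.pyGetD r (i + 1) 0 - PySem.List.pyGetD r i 0) = dstep r := by
  rcases Nat.eq_zero_or_pos r.length with h0 | h1
  · rw [List.eq_nil_of_length_eq_zero h0]
    rw [PySem.List.pyRange_one_eq_nil (by simp)]
    simp [dstep]
  · have hcast : ((r.length : Int) - 1) = ((r.length - 1 : Nat) : Int) := by push_cast [h1]; omega
    rw [hcast, PySem.List.pyRange_zero_natCast, List.map_map]
    apply List.ext_getElem
    · simp [len_dstep]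
    · intro i hi1 hi2
      have hib : i + 1 < r.length := by
        simp only [List.length_map, List.length_range] at hi1; omega
      simp only [List.getElem_map, List.getElem_range, Function.comp]
      have c1 : ((i : Int) + 1) = ((i + 1 : Nat) : Int) := by push_cast; ring
      rw [c1, PySem.List.pyGetD_natCast, PySem.List.pyGetD_natCast, getElem_dstep,
        List.getD_eq_getElem _ _ hib, List.getD_eq_getElem _ _ (by omega : i < r.length)]

theorem eq_singleton_of_length_one (l : List Int) (h : l.length = 1) : l = [l.getD 0 0] := by
  match l, h with
  | [a], _ => rfl

-- one backward in-place sweep over indices j..len-1 is a pointwise map: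
-- out[i] = z[i] - z[i-1] for j ≤ i, out[i] = z[i] otherwise
theorem sweep_pw (m : Nat) : ∀ (j : Nat) (z : List Int), 1 ≤ j → z.length ≤ j + m →
    (((PySem.List.pyRange (j : Int) (z.length : Int) 1).foldr
        (fun i y => y.set i.toNat (PySem.List.pyGetD y i 0 - PySem.List.pyGetD y (i - 1) 0)) z).length
      = z.length ∧
     ∀ i : Nat, i < z.length →
       ((PySem.List.pyRange (j : Int) (z.length : Int) 1).foldr
        (fun i y => y.set i.toNat (PySem.List.pyGetD y i 0 - PySem.List.pyGetD y (i - 1) 0)) z).getD i 0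
        = if j ≤ i then z.getD i 0 - z.getD (i - 1) 0 else z.getD i 0) := by
  induction m with
  | zero =>
    intro j z hj hlen
    rw [PySem.List.pyRange_one_eq_nil (by exact_mod_cast hlen)]
    refine ⟨rfl, fun i hi => ?_⟩
    rw [if_neg (by omega)]
    rfl
  | succ m ih =>
    intro j z hj hlen
    by_cases hlt : z.length ≤ j
    · rw [PySem.List.pyRange_one_eq_nil (by exact_mod_cast hlt)]
      refine ⟨rfl, fun i hi => ?_⟩
      rw [if_neg (by omega)]
      rfl
    · rw [not_le] at hlt
      rw [PySem.List.pyRange_one_cons (by exact_mod_cast hlt),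
        show ((j : Int) + 1) = ((j + 1 : Nat) : Int) by push_cast; ring]
      obtain ⟨hlw, hpw⟩ := ih (j + 1) z (by omega) (by omega)
      simp only [List.foldr_cons]
      set w := ((PySem.List.pyRange ((j + 1 : Nat) : Int) (z.length : Int) 1).foldr
        (fun i y => y.set i.toNat (PySem.List.pyGetD y i 0 - PySem.List.pyGetD y (i - 1) 0)) z) with hw
      rw [show ((j : Int).toNat) = j from Int.toNat_natCast j,
        show ((j : Int) - 1) = ((j - 1 : Nat) : Int) by push_cast [hj]; ring,
        PySem.List.pyGetD_natCast, PySem.List.pyGetD_natCast]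
      have hwj : w.getD j 0 = z.getD j 0 := by
        rw [hpw j hlt, if_neg (by omega)]
      have hwj1 : w.getD (j - 1) 0 = z.getD (j - 1) 0 := by
        rw [hpw (j - 1) (by omega), if_neg (by omega)]
      rw [hwj, hwj1]
      refine ⟨by simpa using hlw, fun i hi => ?_⟩
      by_cases hij : i = j
      · subst hij
        rw [List.getD_eq_getElem _ _ (by simpa [hlw] using hi),
          List.getElem_set_self, if_pos le_rfl]
      · have hlen' : i < (w.set j (z.getD j 0 - z.getD (j - 1) 0)).length := by
          simpa [hlw] using hi
        rw [List.getD_eq_getElem _ _ hlen', List.getElem_set_ne (by omega),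
          ← List.getD_eq_getElem w 0 (by simpa [hlw] using hi), hpw i hi]
        by_cases hji : j ≤ i
        · rw [if_pos (by omega), if_pos hji]
        · rw [if_neg (by omega), if_neg hji]

-- getD of the B-side invariant state
theorem getD_invState (y : List Int) (k i : Nat) :
    ((List.range k).map (hdI y) ++ dstep^[k] y).getD i 0
      = if i < k then hdI y i else (dstep^[k] y).getD (i - k) 0 := by
  by_cases h : i < k
  · rw [List.getD_append _ _ _ _ (by simpa using h), if_pos h,
      List.getD_eq_getElem _ _ (by simpa using h)]
    simp
  · rw [List.getD_append_right _ _ _ _ (by simpa using h), if_neg h]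
    simp

-- after outer pass k, B's array is [Δ⁰y[0], …, Δ^(k-1)y[0]] ++ dstep^[k] y-- after outer pass k, B's array is [Δ⁰y[0], …, Δ^(k-1)y[0]] ++ dstep^[k] y
theorem B_loop (y : List Int) (k : Nat) (hk : k ≤ y.length - 1) :
    (PySem.List.pyRange 1 (1 + (k : Int)) 1).foldl
      (fun y' j => ((PySem.List.pyRange j (y.length : Int) 1).reverse).foldl
          (fun y i => y.set i.toNat (PySem.List.pyGetD y i 0 - PySem.List.pyGetD y (i - 1) 0)) y') y
    = (List.range k).map (hdI y) ++ dstep^[k] y := by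
  induction k with
  | zero =>
    rw [show (1 + ((0 : Nat) : Int)) = 1 by norm_num, PySem.List.pyRange_one_eq_nil le_rfl]
    simp
  | succ k ih =>
    have hkn : k + 1 < y.length := by omega
    rw [show (1 + ((k + 1 : Nat) : Int)) = (1 + (k : Int)) + 1 by push_cast; ring,
      PySem.List.pyRange_one_succ_right (by omega), List.foldl_append, ih (by omega)]
    simp only [List.foldl_cons, List.foldl_nil]
    have hzlen : ((List.range k).map (hdI y) ++ dstep^[k] y).length = y.length := by
      simp only [List.length_append, List.length_map, List.length_range, len_iter]
      omega
    rw [show (1 + (k : Int)) = ((k + 1 : Nat) : Int) by push_cast; ring, ← hzlen,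
      List.foldl_reverse]
    obtain ⟨hlw, hpw⟩ := sweep_pw ((List.range k).map (hdI y) ++ dstep^[k] y).length (k + 1)
      ((List.range k).map (hdI y) ++ dstep^[k] y) (by omega) (by omega)
    apply List.ext_getElem
    · rw [hlw]
      simp only [List.length_append, List.length_map, List.length_range, len_iter, hzlen]
      omega
    · intro i h1 h2
      have hiy : i < y.length := by rw [hlw, hzlen] at h1; exact h1
      rw [← List.getD_eq_getElem _ 0 h1, ← List.getD_eq_getElem _ 0 h2,
        hpw i (by omega), getD_invState y (k + 1) i]
      by_cases hik : k + 1 ≤ i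
      · rw [if_pos hik, if_neg (by omega), getD_invState y k i, getD_invState y k (i - 1),
          if_neg (by omega), if_neg (by omega), Function.iterate_succ_apply',
          getD_dstep _ _ (by rw [len_iter]; omega),
          show i - (k + 1) + 1 = i - k by omega, show i - (k + 1) = i - 1 - k by omega]
      · rw [if_neg hik, if_pos (by omega), getD_invState y k i]
        by_cases hik2 : i < k
        · rw [if_pos hik2]
        · have hik3 : i = k := by omega
          subst hik3
          rw [if_neg hik2, show i - i = 0 by omega]
          rfl

theorem B_lemma : ∀ (y : List Int), calcul_delta_y_alt y = specList y := by
  intro y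
  rcases Nat.eq_zero_or_pos y.length with h0 | h1
  · rw [List.eq_nil_of_length_eq_zero h0]
    rfl
  · show (PySem.List.pyRange 1 ((y.length : Int)) 1).foldl
      (fun y' j => ((PySem.List.pyRange j (y.length : Int) 1).reverse).foldl
          (fun y i => y.set i.toNat (PySem.List.pyGetD y i 0 - PySem.List.pyGetD y (i - 1) 0)) y') y
      = specList y
    rw [show PySem.List.pyRange 1 ((y.length : Int)) 1
          = PySem.List.pyRange 1 (1 + ((y.length - 1 : Nat) : Int)) 1 by
        congr 1
        rw [Nat.cast_sub h1]; ring,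
      B_loop y (y.length - 1) le_rfl,
      eq_singleton_of_length_one (dstep^[y.length - 1] y) (by rw [len_iter]; omega)]
    show _ = (List.range y.length).map (hdI y)
    rw [show y.length = (y.length - 1) + 1 by omega, List.range_succ, List.map_append]
    rfl

theorem cons_head_drop (y : List Int) (h1 : 1 ≤ y.length) :
    (List.range 1).map (hdI y) ++ y.drop 1 = y := by
  cases y with
  | nil => simp at h1
  | cons a t => simp [hdI]

-- after outer iteration j = k, A's table is y_k :: [dstep y, …, dstep^[k] y]
-- with y_k = [Δ⁰y[0], …, Δ^k y[0]] ++ y.drop (k+1)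
theorem A_loop (y : List Int) (k : Nat) (h1 : 1 ≤ y.length) (hk : k ≤ y.length - 1) :
    (PySem.List.pyRange 1 (1 + (k : Int)) 1).foldl
      (fun (st : List (List Int) × List Int) (j : Int) =>
        let table := st.1
        let yc := st.2
        let row := PySem.List.pyGetD table (j - 1) []
        let next_row := (PySem.List.pyRange 0 ((y.length : Int) - j) 1).foldl
          (fun acc i => acc ++ [PySem.List.pyGetD row (i + 1) 0 - PySem.List.pyGetD row i 0]) []
        let table2 := table ++ [next_row]
        let yc2 := yc.set j.toNat (PySem.List.pyGetD next_row 0 0)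
        (table2.set 0 yc2, yc2))
      ([y], y)
    = (((List.range (k + 1)).map (hdI y) ++ y.drop (k + 1))
         :: (List.range k).map (fun m => dstep^[m + 1] y),
       (List.range (k + 1)).map (hdI y) ++ y.drop (k + 1)) := by
  induction k with
  | zero =>
    rw [show (1 + ((0 : Nat) : Int)) = 1 by norm_num, PySem.List.pyRange_one_eq_nil le_rfl]
    rw [List.foldl_nil, cons_head_drop y h1]
    simp
  | succ k ih =>
    have hkn : k + 1 < y.length := by omega
    rw [show (1 + ((k + 1 : Nat) : Int)) = (1 + (k : Int)) + 1 by push_cast; ring,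
      PySem.List.pyRange_one_succ_right (by omega), List.foldl_append, ih (by omega)]
    simp only [List.foldl_cons, List.foldl_nil]
    have hrow : PySem.List.pyGetD
        (((List.range (k + 1)).map (hdI y) ++ y.drop (k + 1))
          :: (List.range k).map (fun m => dstep^[m + 1] y)) ((1 : Int) + (k : Int) - 1) []
        = dstep^[k] y := by
      rw [show (1 : Int) + (k : Int) - 1 = ((k : Nat) : Int) by ring,
        PySem.List.pyGetD_natCast]
      cases k with
      | zero => simpa using cons_head_drop y h1
      | succ m =>
        rw [List.getD_cons_succ, List.getD_eq_getElem _ _ (by simp),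
          List.getElem_map, List.getElem_range]
    rw [hrow]
    have hnr : (PySem.List.pyRange 0 ((y.length : Int) - (1 + (k : Int))) 1).foldl
        (fun acc i => acc ++
          [PySem.List.pyGetD (dstep^[k] y) (i + 1) 0 - PySem.List.pyGetD (dstep^[k] y) i 0]) []
        = dstep^[k + 1] y := by
      rw [Function.iterate_succ_apply',
        show ((y.length : Int) - (1 + (k : Int))) = (((dstep^[k] y).length : Int) - 1) by
          rw [len_iter, Nat.cast_sub (by omega)]; ring,
        PySem.List.foldl_append_singleton_eq_map, List.nil_append, map_diff_pyRange]
    rw [hnr]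
    have hv : PySem.List.pyGetD (dstep^[k + 1] y) 0 0 = hdI y (k + 1) := by
      rw [show (0 : Int) = ((0 : Nat) : Int) from rfl, PySem.List.pyGetD_natCast]
      rfl
    rw [hv, show ((1 : Int) + (k : Int)).toNat = k + 1 by omega]
    have hset : ((List.range (k + 1)).map (hdI y) ++ y.drop (k + 1)).set (k + 1) (hdI y (k + 1))
        = (List.range (k + 1 + 1)).map (hdI y) ++ y.drop (k + 1 + 1) := by
      rw [List.set_append, if_neg (by simp),
        show k + 1 - ((List.range (k + 1)).map (hdI y)).length = 0 by simp,
        List.drop_eq_getElem_cons hkn, List.set_cons_zero,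
        List.range_succ (n := k + 1), List.map_append]
      simp [List.append_assoc]
    rw [hset, List.cons_append, List.set_cons_zero,
      show ((List.range k).map (fun m => dstep^[m + 1] y) ++ [dstep^[k + 1] y])
          = (List.range (k + 1)).map (fun m => dstep^[m + 1] y) by
        rw [List.range_succ, List.map_append]; simp]

theorem A_lemma : ∀ (y : List Int), calcul_delta_y y = specList y := by
  intro y
  rcases Nat.eq_zero_or_pos y.length with h0 | h1
  · rw [List.eq_nil_of_length_eq_zero h0]
    rfl
  · show ((PySem.List.pyRange 1 ((y.length : Int)) 1).foldl
      (fun (st : List (List Int) × List Int) (j : Int) =>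
        let table := st.1
        let yc := st.2
        let row := PySem.List.pyGetD table (j - 1) []
        let next_row := (PySem.List.pyRange 0 ((y.length : Int) - j) 1).foldl
          (fun acc i => acc ++ [PySem.List.pyGetD row (i + 1) 0 - PySem.List.pyGetD row i 0]) []
        let table2 := table ++ [next_row]
        let yc2 := yc.set j.toNat (PySem.List.pyGetD next_row 0 0)
        (table2.set 0 yc2, yc2))
      ([y], y)).2 = specList y
    rw [show PySem.List.pyRange 1 ((y.length : Int)) 1
          = PySem.List.pyRange 1 (1 + ((y.length - 1 : Nat) : Int)) 1 by
        congr 1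
        rw [Nat.cast_sub h1]; ring,
      A_loop y (y.length - 1) h1 le_rfl]
    show (List.range (y.length - 1 + 1)).map (hdI y) ++ y.drop (y.length - 1 + 1) = specList y
    rw [show y.length - 1 + 1 = y.length by omega, List.drop_length, List.append_nil]
    rfl

-- ===== VERDICT (by name: the statement is the Claim_ definition above) =====
theorem calcul_delta_y_spec : Claim_equal_calcul_delta_y := by
  intro y _
  show calcul_delta_y y = calcul_delta_y_alt y
  rw [A_lemma, B_lemma]
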